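-- pv_equiv track=rewrite | github.com/ffakhry002/IntegratedReactorModel | ML/data/test_to_all_check.py | apply_d4_transformations
-- ===== SOURCE A (Python) =====
-- def apply_d4_transformations(positions):
--     """Apply all 8 D4 symmetry transformations to a set of positions."""
--     transformations = []
--
--     # Original
--     transformations.append(sorted(positions))
--
--     # 90° rotation: (i,j) -> (j, 7-i)
--     transformations.append(sorted([(j, 7-i) for i, j in positions]))
--
--     # 180° rotation: (i,j) -> (7-i, 7-j)
--     transformations.append(sorted([(7-i, 7-j) for i, j in positions]))
--
--     # 270° rotation: (i,j) -> (7-j, i)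
--     transformations.append(sorted([(7-j, i) for i, j in positions]))
--
--     # Horizontal flip: (i,j) -> (7-i, j)
--     transformations.append(sorted([(7-i, j) for i, j in positions]))
--
--     # Vertical flip: (i,j) -> (i, 7-j)
--     transformations.append(sorted([(i, 7-j) for i, j in positions]))
--
--     # Transpose: (i,j) -> (j, i)
--     transformations.append(sorted([(j, i) for i, j in positions]))
--
--     # Anti-diagonal: (i,j) -> (7-j, 7-i)
--     transformations.append(sorted([(7-j, 7-i) for i, j in positions]))
--
--     return transformations
-- ===== SOURCE B (Python) =====
-- def _rot(pts):
--     """One quarter-turn step: (i,j) -> (j, 7-i)."""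
--     return [(j, 7 - i) for i, j in pts]
--
-- def apply_d4_transformations(positions):
--     """Apply all 8 D4 symmetry transformations to a set of positions."""
--     # rotations: identity, then repeatedly apply the single quarter-turn step
--     r0 = [(i, j) for i, j in positions]
--     r1 = _rot(r0)        # 90
--     r2 = _rot(r1)        # 180
--     r3 = _rot(r2)        # 270
--     # reflections: base horizontal flip, then repeatedly apply the quarter-turn
--     f0 = [(7 - i, j) for i, j in positions]   # horizontal flip
--     f1 = _rot(f0)        # transpose
--     f2 = _rot(f1)        # vertical flip
--     f3 = _rot(f2)        # anti-diagonal
--     return [sorted(t) for t in (r0, r1, r2, r3, f0, f2, f1, f3)]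
-- ===== Notes on version B (the rewrite author's own statement) =====
-- stated objective: alternative
-- what changed: Instead of eight independent hand-written coordinate formulas, B generates all transforms from a single quarter-turn step rot(i,j)=(j,7-i) applied repeatedly to the identity and to one base horizontal flip, then sorts each.
import Mathlib
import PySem

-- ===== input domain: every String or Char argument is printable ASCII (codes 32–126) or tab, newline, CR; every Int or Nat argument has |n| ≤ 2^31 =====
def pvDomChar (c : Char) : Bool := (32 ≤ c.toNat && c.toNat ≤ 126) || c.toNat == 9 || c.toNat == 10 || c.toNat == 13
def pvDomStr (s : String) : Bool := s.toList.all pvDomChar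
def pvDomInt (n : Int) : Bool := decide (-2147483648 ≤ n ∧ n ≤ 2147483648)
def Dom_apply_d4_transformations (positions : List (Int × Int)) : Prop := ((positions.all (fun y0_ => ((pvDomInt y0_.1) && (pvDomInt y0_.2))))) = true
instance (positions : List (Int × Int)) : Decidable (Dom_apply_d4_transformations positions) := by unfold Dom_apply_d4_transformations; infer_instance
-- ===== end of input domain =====

-- B generates all transforms from one quarter-turn step applied repeatedly, instead of A's eight independent formulas (alternative decomposition, same cost).

-- ===== PORT A =====
def apply_d4_transformations (positions : List (Int × Int)) : List (List (Int × Int)) :=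
  [ PySem.List.sorted2 positions (fun p => p.1) (fun p => p.2)
  , PySem.List.sorted2 (positions.map (fun p => (p.2, 7 - p.1))) (fun p => p.1) (fun p => p.2)
  , PySem.List.sorted2 (positions.map (fun p => (7 - p.1, 7 - p.2))) (fun p => p.1) (fun p => p.2)
  , PySem.List.sorted2 (positions.map (fun p => (7 - p.2, p.1))) (fun p => p.1) (fun p => p.2)
  , PySem.List.sorted2 (positions.map (fun p => (7 - p.1, p.2))) (fun p => p.1) (fun p => p.2)
  , PySem.List.sorted2 (positions.map (fun p => (p.1, 7 - p.2))) (fun p => p.1) (fun p => p.2)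
  , PySem.List.sorted2 (positions.map (fun p => (p.2, p.1))) (fun p => p.1) (fun p => p.2)
  , PySem.List.sorted2 (positions.map (fun p => (7 - p.2, 7 - p.1))) (fun p => p.1) (fun p => p.2) ]

-- ===== PORT B =====
-- one quarter-turn step: (i,j) -> (j, 7-i)
def pvRot (pts : List (Int × Int)) : List (Int × Int) := pts.map (fun p => (p.2, 7 - p.1))

def apply_d4_transformations_alt (positions : List (Int × Int)) : List (List (Int × Int)) :=
  let r0 := positions.map (fun p => (p.1, p.2))
  let r1 := pvRot r0
  let r2 := pvRot r1
  let r3 := pvRot r2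
  let f0 := positions.map (fun p => (7 - p.1, p.2))
  let f1 := pvRot f0
  let f2 := pvRot f1
  let f3 := pvRot f2
  [r0, r1, r2, r3, f0, f2, f1, f3].map (fun t => PySem.List.sorted2 t (fun p => p.1) (fun p => p.2))

-- ===== PRECONDITION & SPEC =====
def Spec_apply_d4_transformations (positions : List (Int × Int)) (out : List (List (Int × Int))) : Prop := out = apply_d4_transformations_alt positions
instance (positions : List (Int × Int)) (out : List (List (Int × Int))) : Decidable (Spec_apply_d4_transformations positions out) := by unfold Spec_apply_d4_transformations; infer_instance

-- ===== CLAIM (what is proved, stated in full; the proofs are below) =====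
def Claim_equal_apply_d4_transformations : Prop := ∀ (positions : List (Int × Int)), Dom_apply_d4_transformations positions → Spec_apply_d4_transformations positions (apply_d4_transformations positions)

-- ===== LEMMAS AND PROOFS =====
theorem pvRot_map (f : (Int × Int) → (Int × Int)) (xs : List (Int × Int)) :
    pvRot (xs.map f) = xs.map (fun p => ((f p).2, 7 - (f p).1)) := by
  simp [pvRot, List.map_map, Function.comp]

-- ===== VERDICT (by name: the statement is the Claim_ definition above) =====
theorem apply_d4_transformations_spec : Claim_equal_apply_d4_transformations := by
  intro positions _
  unfold Spec_apply_d4_transformations apply_d4_transformations apply_d4_transformations_alt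
  simp only [pvRot_map, List.map]
  norm_num
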